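-- pv_equiv track=rewrite | github.com/nbglink/pokadviser | poker_oop_tool.py | flush_draw
-- ===== SOURCE A (Python) =====
-- def made_flush(hole, board):
--     """Проверява дали имаме made flush (5+ карти от една боя, поне 1 hole card)."""
--     for suit in set(c[1] for c in hole):
--         cnt_hole = sum(1 for c in hole if c[1] == suit)
--         cnt_board = sum(1 for c in board if c[1] == suit)
--         if cnt_hole >= 1 and cnt_hole + cnt_board >= 5:
--             return True
--     return False
--
-- def flush_draw(hole, board):
--     """Проверява за flush draw (4 карти от една боя, поне 1 hole card). Не е draw ако вече е made."""
--     if made_flush(hole, board):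
--         return False
--     for suit in set(c[1] for c in hole):
--         cnt_hole = sum(1 for c in hole if c[1] == suit)
--         cnt_board = sum(1 for c in board if c[1] == suit)
--         if cnt_hole >= 1 and cnt_hole + cnt_board >= 4:
--             return True
--     return False
-- ===== SOURCE B (Python) =====
-- def flush_draw(hole, board):
--     """Flush draw: best combined suit count (over suits present in hole) is exactly 4.
--     (==5+ would be a made flush, <=3 is no draw.)"""
--     counts = {}
--     for c in hole + board:
--         s = c[1]
--         counts[s] = counts.get(s, 0) + 1
--     best = 0
--     for c in hole:
--         best = max(best, counts[c[1]])
--     return best == 4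
-- ===== Notes on version B (the rewrite author's own statement) =====
-- stated objective: simpler
-- what changed: Replaces A's two separate per-suit scanning passes (made_flush guard plus a second draw loop, each recounting hole and board per suit) by one counting pass building a suit counter over hole+board, a running max of the counts over hole suits, and the single comparison best == 4.
-- outside the precondition, e.g. on flush_draw([], ['x']): A returns False, B raises IndexError
import Mathlib
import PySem

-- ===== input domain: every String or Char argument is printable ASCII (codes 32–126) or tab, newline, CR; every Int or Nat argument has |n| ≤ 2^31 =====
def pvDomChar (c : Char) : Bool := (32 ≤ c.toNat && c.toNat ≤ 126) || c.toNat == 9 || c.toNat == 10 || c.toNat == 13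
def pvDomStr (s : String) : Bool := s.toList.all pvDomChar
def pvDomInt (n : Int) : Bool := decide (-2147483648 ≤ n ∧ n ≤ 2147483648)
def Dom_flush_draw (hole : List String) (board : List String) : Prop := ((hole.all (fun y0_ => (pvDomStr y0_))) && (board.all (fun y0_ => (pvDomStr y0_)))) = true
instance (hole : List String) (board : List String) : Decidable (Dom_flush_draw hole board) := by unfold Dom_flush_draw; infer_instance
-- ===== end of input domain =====

-- B replaces A's two per-suit scanning passes (made-flush guard + draw loop) by one suit counter
-- over hole+board, a running max over hole suits, and a single comparison best = 4 (objective: simpler).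


-- c[1]: exact where Pre_ holds (every card has length ≥ 2, so pyGet? is some)
def pvSuit (c : String) : Char := ((PySem.Str.pyGet? c 1).getD ' ')

-- ===== PORT A =====
def made_flush (hole : List String) (board : List String) : Bool :=
  (PySem.Set.ofList (hole.map pvSuit)).any (fun s =>
    let cnt_hole : Int := hole.foldl (fun a c => if pvSuit c = s then a + 1 else a) 0
    let cnt_board : Int := board.foldl (fun a c => if pvSuit c = s then a + 1 else a) 0
    decide (1 ≤ cnt_hole ∧ 5 ≤ cnt_hole + cnt_board))

def flush_draw (hole : List String) (board : List String) : Bool :=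
  if made_flush hole board then false
  else
    (PySem.Set.ofList (hole.map pvSuit)).any (fun s =>
      let cnt_hole : Int := hole.foldl (fun a c => if pvSuit c = s then a + 1 else a) 0
      let cnt_board : Int := board.foldl (fun a c => if pvSuit c = s then a + 1 else a) 0
      decide (1 ≤ cnt_hole ∧ 4 ≤ cnt_hole + cnt_board))

-- ===== PORT B =====
def flush_draw_alt (hole : List String) (board : List String) : Bool :=
  let counts : PySem.Dict Char Int :=
    (hole ++ board).foldl (fun d c => d.modify (pvSuit c) 0 (· + 1)) PySem.Dict.empty
  let best : Int := hole.foldl (fun b c => max b (counts.getD (pvSuit c) 0)) 0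
  decide (best = 4)

-- ===== PRECONDITION & SPEC =====
-- Pre_ excludes inputs with a card shorter than 2 characters: Python's c[1] raises IndexError on
-- them whenever hole is nonempty; with empty hole A accidentally returns False without ever
-- reading board, which B's upfront counting pass does not reproduce (it raises too).
def Pre_flush_draw (hole : List String) (board : List String) : Prop :=
  (∀ c ∈ hole, 2 ≤ c.toList.length) ∧ (∀ c ∈ board, 2 ≤ c.toList.length)
instance (hole : List String) (board : List String) : Decidable (Pre_flush_draw hole board) := by
  unfold Pre_flush_draw; infer_instance
def pvWitness_flush_draw : List String × List String := (["Ah", "Kh"], ["2h", "7h", "9c"])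

def Spec_flush_draw (hole : List String) (board : List String) (out : Bool) : Prop := out = flush_draw_alt hole board
instance (hole : List String) (board : List String) (out : Bool) : Decidable (Spec_flush_draw hole board out) := by unfold Spec_flush_draw; infer_instance

-- ===== CLAIM (what is proved, stated in full; the proofs are below) =====
def Claim_equal_flush_draw : Prop := ∀ (hole : List String) (board : List String), Dom_flush_draw hole board → Pre_flush_draw hole board → Spec_flush_draw hole board (flush_draw hole board)

-- ===== LEMMAS AND PROOFS =====

-- count of cards of suit s in xs
def pvC (xs : List String) (s : Char) : Nat := xs.countP (fun c => pvSuit c == s)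

lemma pvCnt_fold (xs : List String) (s : Char) :
    xs.foldl (fun a c => if pvSuit c = s then a + 1 else a) 0 = (pvC xs s : Int) := by
  rw [PySem.List.foldl_ite_add_one]
  have h : List.countP (fun x => decide (pvSuit x = s)) xs = List.countP (fun c => pvSuit c == s) xs := by
    congr 1
  simp [pvC, h]

lemma pvCounts_getD (hole board : List String) (s : Char) :
    ((hole ++ board).foldl (fun d c => d.modify (pvSuit c) 0 (· + 1))
        PySem.Dict.empty).getD s 0 = (pvC hole s : Int) + (pvC board s : Int) := by
  rw [← List.foldl_map (f := pvSuit) (g := fun (d : PySem.Dict Char Int) x => d.modify x 0 (· + 1))]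
  rw [PySem.Dict.getD_foldl_modify_add_one]
  simp [pvC, List.count_eq_countP, List.countP_map, List.countP_append, Function.comp_def]

-- running max of a projection is the start value or one of the projected values
lemma pvFoldlMaxProjMem (xs : List String) (f : String → Int) (a : Int) :
    xs.foldl (fun b c => max b (f c)) a = a ∨
      ∃ c ∈ xs, xs.foldl (fun b c => max b (f c)) a = f c := by
  induction xs generalizing a with
  | nil => exact Or.inl rfl
  | cons x t ih =>
    simp only [List.foldl_cons]
    rcases ih (max a (f x)) with h | ⟨c, hc, h⟩
    · rcases max_choice a (f x) with hm | hm
      · exact Or.inl (by rw [h, hm])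
      · exact Or.inr ⟨x, List.mem_cons_self, by rw [h, hm]⟩
    · exact Or.inr ⟨c, List.mem_cons_of_mem _ hc, h⟩

theorem flush_draw_spec : Claim_equal_flush_draw := by
  intro hole board _ _
  unfold Spec_flush_draw flush_draw flush_draw_alt made_flush
  -- combined hole+board count of the suit of card c
  set g : String → Int := fun c => (pvC hole (pvSuit c) : Int) + (pvC board (pvSuit c) : Int) with hg
  -- B's running max reads the counter dict; replace each lookup by the combined count
  have hB :
      hole.foldl (fun b c =>
        max b (((hole ++ board).foldl (fun d c => d.modify (pvSuit c) 0 (· + 1))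
          PySem.Dict.empty).getD (pvSuit c) 0)) 0
      = hole.foldl (fun b c => max b (g c)) 0 := by
    apply PySem.List.foldl_congr_mem
    intro acc c _
    rw [pvCounts_getD, hg]
  simp only [pvCnt_fold, hB]
  set best := hole.foldl (fun b c => max b (g c)) 0 with hbest
  have hub := PySem.List.le_foldl_max_int hole g 0
  have hmem := pvFoldlMaxProjMem hole g 0
  -- A's per-suit test (threshold k) over the suit set ↔ some hole card's combined count ≥ k
  have hany : ∀ k : Int,
      ((PySem.Set.ofList (hole.map pvSuit)).any (fun s =>
        decide (1 ≤ ((pvC hole s : Nat) : Int) ∧ k ≤ ((pvC hole s : Nat) : Int) + ((pvC board s : Nat) : Int))) = true)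
      ↔ ∃ c ∈ hole, k ≤ g c := by
    intro k
    rw [List.any_eq_true]
    constructor
    · rintro ⟨s, hs, hp⟩
      rw [PySem.Set.mem_ofList, List.mem_map] at hs
      obtain ⟨c, hc, rfl⟩ := hs
      exact ⟨c, hc, (of_decide_eq_true hp).2⟩
    · rintro ⟨c, hc, hk⟩
      refine ⟨pvSuit c, ?_, decide_eq_true ⟨?_, hk⟩⟩
      · rw [PySem.Set.mem_ofList]
        exact List.mem_map_of_mem hc
      · have : 0 < pvC hole (pvSuit c) := List.countP_pos_iff.2 ⟨c, hc, by simp⟩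
        exact_mod_cast this
  by_cases h5 : ∃ c ∈ hole, (5 : Int) ≤ g c
  · -- made flush: A returns false; best ≥ 5 so best ≠ 4
    rw [if_pos ((hany 5).2 h5)]
    obtain ⟨c, hc, h5c⟩ := h5
    have hge : (5 : Int) ≤ best := le_trans h5c (hub.2 c hc)
    have : best ≠ 4 := by omega
    simp [this]
  · rw [if_neg (fun hh => h5 ((hany 5).1 hh))]
    by_cases h4 : ∃ c ∈ hole, (4 : Int) ≤ g c
    · -- draw: some count ≥ 4, none ≥ 5 ⇒ best = 4
      rw [(hany 4).2 h4]
      obtain ⟨c, hc, h4c⟩ := h4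
      have hb4 : (4 : Int) ≤ best := le_trans h4c (hub.2 c hc)
      have hb : best = 4 := by
        rcases hmem with h0 | ⟨c', hc', he⟩
        · omega
        · have hlt : ¬ (5 : Int) ≤ g c' := fun hx => h5 ⟨c', hc', hx⟩
          omega
      simp [hb]
    · -- no draw: all counts ≤ 3 ⇒ best ≠ 4
      have hfalse : ((PySem.Set.ofList (hole.map pvSuit)).any (fun s =>
          decide (1 ≤ ((pvC hole s : Nat) : Int) ∧ 4 ≤ ((pvC hole s : Nat) : Int) + ((pvC board s : Nat) : Int))) = false) := by
        rw [Bool.eq_false_iff]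
        exact fun hh => h4 ((hany 4).1 hh)
      rw [hfalse]
      have : best ≠ 4 := by
        rcases hmem with h0 | ⟨c', hc', he⟩
        · omega
        · intro hx
          exact h4 ⟨c', hc', by omega⟩
      simp [this]
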